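-- pv_equiv track=rewrite | github.com/christopheprudent/python-exercices | map/e006_map_case.py | to_upper_and_without_dup
-- ===== SOURCE A (Python) =====
-- def to_upper_and_without_dup(s):
--     _result = _prev = s[0].upper()
--     for c in s[1:]:
--         _current = c.upper()
--         if _current != _prev:
--             _result += _current
--         _prev = _current
--
--     return _result
-- ===== SOURCE B (Python) =====
-- def to_upper_and_without_dup(s):
--     u = s.upper()
--     n = len(u)
--     out = []
--     i = 0
--     while i < n:
--         out.append(u[i])
--         j = i + 1
--         while j < n and u[j] == u[i]:
--             j += 1
--         i = j
--     return ''.join(out)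
-- ===== Notes on version B (the rewrite author's own statement) =====
-- stated objective: alternative
-- what changed: Instead of A's per-character pass maintaining _prev/_current state and growing a string, B uppercases once and then iterates run by run: an outer loop emits the head of each maximal run into a list while an inner scan skips to the end of the run, joining at the end; Pre_ excludes only the empty string, on which A raises IndexError (s[0]) while B returns ''.
-- outside the precondition, e.g. on to_upper_and_without_dup(''): A raises IndexError, B returns ''
import Mathlib
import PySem

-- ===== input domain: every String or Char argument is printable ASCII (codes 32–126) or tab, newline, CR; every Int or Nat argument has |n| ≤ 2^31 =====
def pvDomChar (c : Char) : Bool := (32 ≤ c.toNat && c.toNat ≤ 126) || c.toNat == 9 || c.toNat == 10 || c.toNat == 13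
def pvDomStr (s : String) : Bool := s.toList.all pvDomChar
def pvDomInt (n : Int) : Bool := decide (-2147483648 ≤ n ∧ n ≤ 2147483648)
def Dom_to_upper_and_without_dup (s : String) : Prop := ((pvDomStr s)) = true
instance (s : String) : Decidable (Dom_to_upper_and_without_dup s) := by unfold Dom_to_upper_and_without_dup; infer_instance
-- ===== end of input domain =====

-- B uppercases once and iterates run by run (inner scan skips each maximal run, heads collected and joined), replacing A's per-character _prev/_result state loop; on the empty string A raises IndexError while B returns "".


-- ===== PORT A =====
def to_upper_and_without_dup (s : String) : String :=
  match PySem.Str.pyGet? s 0 with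
  | none => ""   -- IndexError on the empty string: excluded by Pre_
  | some c0 =>
    let p := PySem.Chars.upperChar c0
    let st := (PySem.List.slice s.toList (some 1) none).foldl
      (fun (st : List Char × Char) c =>
        let cur := PySem.Chars.upperChar c
        (if cur ≠ st.2 then st.1 ++ [cur] else st.1, cur)) ([p], p)
    String.mk st.1

-- ===== PORT B =====
-- Source B's outer while over the index i is ported as recursion on the remaining
-- suffix u[i:]; the inner while that advances j past the run is dropWhile on it.
def pvRunHeads (u : List Char) : List Char :=
  match u with
  | [] => []
  | c :: rest => c :: pvRunHeads (rest.dropWhile (· == c))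
termination_by u.length
decreasing_by
  simp only [List.length_cons]
  exact Nat.lt_succ_of_le (List.length_dropWhile_le _ _)

def to_upper_and_without_dup_alt (s : String) : String :=
  String.mk (pvRunHeads (PySem.Str.upper s).toList)

-- ===== PRECONDITION & SPEC =====
def Pre_to_upper_and_without_dup (s : String) : Prop := s ≠ ""
instance (s : String) : Decidable (Pre_to_upper_and_without_dup s) := by unfold Pre_to_upper_and_without_dup; infer_instance
def pvWitness_to_upper_and_without_dup : String := "aA!bb"
def Spec_to_upper_and_without_dup (s : String) (out : String) : Prop := out = to_upper_and_without_dup_alt s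
instance (s : String) (out : String) : Decidable (Spec_to_upper_and_without_dup s out) := by unfold Spec_to_upper_and_without_dup; infer_instance

-- ===== CLAIM (what is proved, stated in full; the proofs are below) =====
def Claim_equal_to_upper_and_without_dup : Prop := ∀ (s : String), Dom_to_upper_and_without_dup s → Pre_to_upper_and_without_dup s → Spec_to_upper_and_without_dup s (to_upper_and_without_dup s)

-- ===== LEMMAS AND PROOFS =====

-- A's fold over the tail with previous char `prev` equals acc ++ the run heads
-- of the uppercased tail after dropping the leading run equal to `prev`.
lemma fold_eq_runHeads : ∀ (cs : List Char) (prev : Char) (acc : List Char),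
    (cs.foldl (fun (st : List Char × Char) c =>
        let cur := PySem.Chars.upperChar c
        (if cur ≠ st.2 then st.1 ++ [cur] else st.1, cur)) (acc, prev)).1
    = acc ++ pvRunHeads ((cs.map PySem.Chars.upperChar).dropWhile (· == prev)) := by
  intro cs
  induction cs with
  | nil => intro prev acc; simp [pvRunHeads]
  | cons c rs ih =>
    intro prev acc
    simp only [List.foldl_cons, List.map_cons, List.dropWhile_cons]
    by_cases h : PySem.Chars.upperChar c = prev
    · simp only [h, BEq.rfl, if_true, ne_eq, not_true_eq_false, if_false]
      rw [ih]
    · have hb : ((PySem.Chars.upperChar c) == prev) = false := by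
        simp [h]
      simp only [hb, ne_eq, h, not_false_eq_true, if_true]
      rw [ih]
      conv_rhs => rw [pvRunHeads.eq_def]
      simp

-- ===== VERDICT (by name: the statement is the Claim_ definition above) =====
theorem to_upper_and_without_dup_spec : Claim_equal_to_upper_and_without_dup := by
  intro s _ hpre
  unfold Spec_to_upper_and_without_dup to_upper_and_without_dup to_upper_and_without_dup_alt
  have hne : s.toList ≠ [] := by
    intro h
    exact hpre (by simpa using congrArg String.ofList h)
  obtain ⟨c, rest, hl⟩ := List.exists_cons_of_ne_nil hne
  have hget : PySem.Str.pyGet? s 0 = some c := by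
    have := PySem.Str.pyGet?_natCast s 0
    simp only [Nat.cast_zero] at this
    rw [this, hl]; rfl
  have hupper : (PySem.Str.upper s).toList = (c :: rest).map PySem.Chars.upperChar := by
    simp [← hl]
    rfl
  have hslice1 : PySem.List.slice s.toList (some 1) none = rest := by
    rw [PySem.List.slice_from s.toList (by norm_num), hl]; rfl
  rw [hget, hupper, hslice1]
  simp only [List.map_cons]
  rw [fold_eq_runHeads]
  conv_rhs => rw [pvRunHeads.eq_def]
  simp
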